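-- pv_equiv track=rewrite | github.com/samitmohan/python | Problems/Hashing/distinctNames.py | distinctNmaes
-- ===== SOURCE A (Python) =====
-- from collections import defaultdict
--
-- def distinctNmaes(ideas):
--     # map key to prefix (c : offee, d : onuts, t : ime, offee)
--     hm = defaultdict(set)  # hashset as the value (for uniquely identifying)
--     for word in ideas:
--         hm[word[0]].add(word[1:])
--
--     ans = 0
--     # intersection
--     for char1 in hm:
--         for char2 in hm:
--             if char1 == char2: continue  # if same then no answer
--             intersect = 0
--             for w in hm[char1]:
--                 if w in hm[char2]:
--                     intersect += 1
--
--             # distinct letters (length - intersection)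
--             d1 = len(hm[char1]) - intersect
--             d2 = len(hm[char2]) - intersect
--             ans += d1 * d2
--     return ans
-- ===== SOURCE B (Python) =====
-- def distinctNmaes(ideas):
--     # inverted index: suffix -> set of first letters; size: letter -> number of distinct suffixes
--     idx = {}
--     size = {}
--     for word in ideas:
--         c, suf = word[0], word[1:]
--         owners = idx.setdefault(suf, set())
--         if c not in owners:
--             owners.add(c)
--             size[c] = size.get(c, 0) + 1
--     # intersection table accumulated per suffix instead of rescanning groups per letter pair
--     inter = {}
--     for owners in idx.values():
--         if len(owners) >= 2:
--             for a in owners: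
--                 for b in owners:
--                     if a != b:
--                         inter[(a, b)] = inter.get((a, b), 0) + 1
--     ans = 0
--     letters = list(size)
--     for c1 in letters:
--         for c2 in letters:
--             if c1 != c2:
--                 i = inter.get((c1, c2), 0)
--                 ans += (size[c1] - i) * (size[c2] - i)
--     return ans
-- ===== Notes on version B (the rewrite author's own statement) =====
-- stated objective: alternative
-- what changed: A rescans each letter's whole suffix group for every ordered letter pair to count intersections; B builds an inverted index suffix->owner letters plus a group-size map in one pass and accumulates an intersection table per suffix, then combines sizes and table entries per letter pair.
import Mathlib
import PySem

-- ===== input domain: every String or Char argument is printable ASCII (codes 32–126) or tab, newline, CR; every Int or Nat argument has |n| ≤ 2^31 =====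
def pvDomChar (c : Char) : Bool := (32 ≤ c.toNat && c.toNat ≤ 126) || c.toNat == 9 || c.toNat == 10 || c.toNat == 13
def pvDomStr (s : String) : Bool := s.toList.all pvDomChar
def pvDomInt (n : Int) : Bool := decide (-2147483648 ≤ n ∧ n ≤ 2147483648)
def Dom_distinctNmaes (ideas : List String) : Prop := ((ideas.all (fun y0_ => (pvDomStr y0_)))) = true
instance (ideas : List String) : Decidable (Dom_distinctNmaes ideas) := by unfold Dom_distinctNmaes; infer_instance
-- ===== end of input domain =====

-- B replaces A's per-letter-pair rescan of the suffix groups by an inverted index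
-- suffix -> owner letters with an accumulated intersection table (objective: alternative).

-- ===== PORT A =====

-- one iteration of A's first loop: hm[word[0]].add(word[1:])
def pvStepA (hm : PySem.Dict Char (PySem.Set String)) (w : String) :
    PySem.Dict Char (PySem.Set String) :=
  match PySem.Str.pyGet? w 0 with
  | some c => hm.insert c (PySem.Set.add (hm.getD c PySem.Set.empty) (PySem.Str.slice w (some 1) none))
  | none => hm   -- IndexError on the empty word; excluded by Pre_

def distinctNmaes (ideas : List String) : Int :=
  let hm := ideas.foldl pvStepA PySem.Dict.empty
  hm.keys.foldl (fun ans c1 =>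
    hm.keys.foldl (fun ans c2 =>
      if c1 == c2 then ans
      else
        let intersect : Int := (hm.getD c1 PySem.Set.empty).foldl
          (fun i w => if PySem.Set.contains (hm.getD c2 PySem.Set.empty) w then i + 1 else i) 0
        let d1 := PySem.Set.len (hm.getD c1 PySem.Set.empty) - intersect
        let d2 := PySem.Set.len (hm.getD c2 PySem.Set.empty) - intersect
        ans + d1 * d2) ans) 0

-- ===== PORT B =====

-- one iteration of B's first loop: owners = idx.setdefault(suf, set()); if c not in owners: owners.add(c); size[c] += 1
def pvStepB (st : PySem.Dict String (PySem.Set Char) × PySem.Dict Char Int) (w : String) :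
    PySem.Dict String (PySem.Set Char) × PySem.Dict Char Int :=
  match PySem.Str.pyGet? w 0 with
  | some c =>
    let suf := PySem.Str.slice w (some 1) none
    let idx1 := st.1.setdefault suf PySem.Set.empty
    let owners := idx1.getD suf PySem.Set.empty
    if owners.contains c then (idx1, st.2)
    else (idx1.insert suf (owners.add c), st.2.insert c (st.2.getD c 0 + 1))
  | none => st   -- IndexError on the empty word; excluded by Pre_

-- inter[(a,b)] += 1 for every ordered pair of distinct owners of one suffix
def pvInterStep (inter : PySem.Dict (Char × Char) Int) (owners : PySem.Set Char) :
    PySem.Dict (Char × Char) Int :=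
  if 2 ≤ PySem.Set.len owners then
    owners.foldl (fun inter a =>
      owners.foldl (fun inter b =>
        if a ≠ b then inter.modify (a, b) 0 (· + 1) else inter) inter) inter
  else inter

def distinctNmaes_alt (ideas : List String) : Int :=
  let st := ideas.foldl pvStepB (PySem.Dict.empty, PySem.Dict.empty)
  let idx := st.1
  let size := st.2
  let inter := idx.values.foldl pvInterStep PySem.Dict.empty
  let letters := size.keys
  letters.foldl (fun ans c1 =>
    letters.foldl (fun ans c2 =>
      if c1 ≠ c2 then
        let i := inter.getD (c1, c2) 0
        ans + (size.getD c1 0 - i) * (size.getD c2 0 - i)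
      else ans) ans) 0

-- ===== PRECONDITION & SPEC =====
-- Pre_ excludes lists containing an empty string: there A raises IndexError on word[0].
def Pre_distinctNmaes (ideas : List String) : Prop := ∀ w ∈ ideas, w ≠ ""
instance (ideas : List String) : Decidable (Pre_distinctNmaes ideas) := by
  unfold Pre_distinctNmaes; infer_instance
def pvWitness_distinctNmaes : List String := ["coffee", "donuts", "time", "toffee"]

def Spec_distinctNmaes (ideas : List String) (out : Int) : Prop := out = distinctNmaes_alt ideas
instance (ideas : List String) (out : Int) : Decidable (Spec_distinctNmaes ideas out) := by
  unfold Spec_distinctNmaes; infer_instance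

-- ===== CLAIM (what is proved, stated in full; the proofs are below) =====
def Claim_equal_distinctNmaes : Prop := ∀ (ideas : List String), Dom_distinctNmaes ideas → Pre_distinctNmaes ideas → Spec_distinctNmaes ideas (distinctNmaes ideas)

-- ===== LEMMAS AND PROOFS =====

-- the joint invariant of the two first-pass loops
structure PvInv (hm : PySem.Dict Char (PySem.Set String))
    (idx : PySem.Dict String (PySem.Set Char)) (size : PySem.Dict Char Int) : Prop where
  keys_eq : size.keys = hm.keys
  idx_nodup : idx.keys.Nodup
  sets_nodup : ∀ c, (hm.getD c PySem.Set.empty).Nodup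
  owners_nodup : ∀ s, (idx.getD s PySem.Set.empty).Nodup
  size_eq : ∀ c, size.getD c 0 = ((hm.getD c PySem.Set.empty).length : Int)
  mem_iff : ∀ s c, c ∈ idx.getD s PySem.Set.empty ↔ s ∈ hm.getD c PySem.Set.empty

lemma pvInv_mem_idx_keys {hm idx size} (inv : PvInv hm idx size) {s : String} {c : Char}
    (h : s ∈ hm.getD c PySem.Set.empty) : s ∈ idx.keys := by
  by_contra hk
  have hc : idx.contains s = false := by
    cases hcc : idx.contains s with
    | true => exact absurd ((PySem.Dict.contains_iff_mem_keys idx s).mp hcc) hk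
    | false => rfl
  have := (inv.mem_iff s c).mpr h
  rw [PySem.Dict.getD_of_not_contains idx _ hc] at this
  simp [PySem.Set.empty] at this

lemma pvInv_mem_hm_keys {hm idx size} (inv : PvInv hm idx size) {s : String} {c : Char}
    (h : s ∈ hm.getD c PySem.Set.empty) : c ∈ hm.keys := by
  by_contra hk
  have hc : hm.contains c = false := by
    cases hcc : hm.contains c with
    | true => exact absurd ((PySem.Dict.contains_iff_mem_keys hm c).mp hcc) hk
    | false => rfl
  rw [PySem.Dict.getD_of_not_contains hm _ hc] at h
  simp [PySem.Set.empty] at h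

lemma pvStep_inv (hm : PySem.Dict Char (PySem.Set String))
    (idx : PySem.Dict String (PySem.Set Char)) (size : PySem.Dict Char Int)
    (inv : PvInv hm idx size) (w : String) (hw : w ≠ "") :
    PvInv (pvStepA hm w) (pvStepB (idx, size) w).1 (pvStepB (idx, size) w).2 := by
  obtain ⟨c, cs, hwl⟩ : ∃ c cs, w.toList = c :: cs := by
    cases hl : w.toList with
    | nil => exact absurd (String.toList_eq_nil_iff.mp hl) hw
    | cons c cs => exact ⟨c, cs, rfl⟩
  have hget : PySem.Str.pyGet? w 0 = some c := by
    simp [hwl, PySem.List.pyGet?, PySem.List.pyIdx?]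
  unfold pvStepA pvStepB
  simp only [hget]
  set suf := PySem.Str.slice w (some 1) none with hsufdef
  set S := hm.getD c PySem.Set.empty with hS
  set idx1 := idx.setdefault suf PySem.Set.empty with hidx1
  set O := idx.getD suf PySem.Set.empty with hO
  have hO1 : idx1.getD suf PySem.Set.empty = O := PySem.Dict.getD_setdefault_self ..
  have hO1' : ∀ s, s ≠ suf → idx1.getD s PySem.Set.empty = idx.getD s PySem.Set.empty := by
    intro s hs
    rw [PySem.Dict.getD_eq_get?_getD, PySem.Dict.get?_setdefault_of_ne _ _ hs,
      ← PySem.Dict.getD_eq_get?_getD]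
  have hsufkeys : idx1.contains suf = true := by
    rw [hidx1, PySem.Dict.contains_setdefault]; simp
  have hidx1nd : idx1.keys.Nodup := by
    rw [hidx1, PySem.Dict.keys_setdefault]
    by_cases hck : idx.contains suf = true
    · simpa [hck] using inv.idx_nodup
    · have hnk : suf ∉ idx.keys := fun hk => by
        simp [(PySem.Dict.contains_iff_mem_keys ..).mpr hk] at hck
      simp [hck, List.nodup_append, inv.idx_nodup]
      exact fun a ha h => hnk (h ▸ ha)
  by_cases hc : c ∈ O
  · -- c already an owner of suf: both sides are unchanged in substance
    have hsufS : suf ∈ S := (inv.mem_iff suf c).mp hc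
    rw [if_pos (by rw [hO1]; exact (PySem.Set.contains_iff O c).mpr hc)]
    have hadd : PySem.Set.add S suf = S := PySem.Set.add_of_mem hsufS
    have hck : hm.contains c = true :=
      (PySem.Dict.contains_iff_mem_keys ..).mpr (pvInv_mem_hm_keys inv hsufS)
    have hhm : ∀ x, (hm.insert c (PySem.Set.add S suf)).getD x PySem.Set.empty
        = hm.getD x PySem.Set.empty := by
      intro x
      rw [PySem.Dict.getD_insert]
      by_cases hx : x = c
      · subst hx; rw [if_pos rfl, hadd, hS]
      · rw [if_neg hx]
    have hidxg : ∀ s, idx1.getD s PySem.Set.empty = idx.getD s PySem.Set.empty := by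
      intro s
      by_cases hs : s = suf
      · subst hs; rw [hO1, hO]
      · exact hO1' s hs
    refine ⟨?_, hidx1nd, ?_, ?_, ?_, ?_⟩
    · rw [PySem.Dict.keys_insert_of_contains _ _ hck]; exact inv.keys_eq
    · intro x; rw [hhm]; exact inv.sets_nodup x
    · intro s; rw [hidxg]; exact inv.owners_nodup s
    · intro x; rw [hhm]; exact inv.size_eq x
    · intro s x; rw [hidxg, hhm]; exact inv.mem_iff s x
  · -- c is a new owner of suf: S gains suf, owners gain c, size[c] += 1
    have hsufS : suf ∉ S := fun h => hc ((inv.mem_iff suf c).mpr h)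
    rw [if_neg (show ¬ (idx1.getD suf PySem.Set.empty).contains c = true from by
      rw [hO1]; exact fun h => hc ((PySem.Set.contains_iff O c).mp h))]
    rw [hO1]
    have haddS : PySem.Set.add S suf = S ++ [suf] := PySem.Set.add_of_not_mem hsufS
    have haddO : PySem.Set.add O c = O ++ [c] := PySem.Set.add_of_not_mem hc
    rw [haddS, haddO]
    have hidxg : ∀ s, (idx1.insert suf (O ++ [c])).getD s PySem.Set.empty
        = if s = suf then O ++ [c] else idx.getD s PySem.Set.empty := by
      intro s
      rw [PySem.Dict.getD_insert]
      by_cases hs : s = suf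
      · simp [hs]
      · rw [if_neg hs, if_neg hs]; exact hO1' s hs
    have hhmg : ∀ x, (hm.insert c (S ++ [suf])).getD x PySem.Set.empty
        = if x = c then S ++ [suf] else hm.getD x PySem.Set.empty := by
      intro x; rw [PySem.Dict.getD_insert]
    have hsizeg : ∀ x, (size.insert c (size.getD c 0 + 1)).getD x 0
        = if x = c then size.getD c 0 + 1 else size.getD x 0 := by
      intro x; rw [PySem.Dict.getD_insert]
    refine ⟨?_, ?_, ?_, ?_, ?_, ?_⟩
    · by_cases hck : hm.contains c = true
      · have hsk : size.contains c = true := by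
          rw [PySem.Dict.contains_iff_mem_keys, inv.keys_eq]
          exact (PySem.Dict.contains_iff_mem_keys ..).mp hck
        rw [PySem.Dict.keys_insert_of_contains _ _ hck,
          PySem.Dict.keys_insert_of_contains _ _ hsk]
        exact inv.keys_eq
      · have hckf : hm.contains c = false := by cases h : hm.contains c <;> simp_all
        have hsk : size.contains c = false := by
          cases h : size.contains c with
          | false => rfl
          | true =>
            have := (PySem.Dict.contains_iff_mem_keys ..).mp h
            rw [inv.keys_eq, ← PySem.Dict.contains_iff_mem_keys] at this
            simp [this] at hckf
        rw [PySem.Dict.keys_insert_of_not_contains _ _ hckf,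
          PySem.Dict.keys_insert_of_not_contains _ _ hsk, inv.keys_eq]
    · rw [PySem.Dict.keys_insert_of_contains _ _ hsufkeys]; exact hidx1nd
    · intro x
      rw [hhmg]
      by_cases hx : x = c
      · rw [if_pos hx]
        have hSnd : S.Nodup := by rw [hS]; exact inv.sets_nodup c
        simp [List.nodup_append, hSnd]
        exact fun a ha h => hsufS (h ▸ ha)
      · rw [if_neg hx]; exact inv.sets_nodup x
    · intro s
      rw [hidxg]
      by_cases hs : s = suf
      · rw [if_pos hs]
        have hOnd : O.Nodup := by rw [hO]; exact inv.owners_nodup suf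
        simp [List.nodup_append, hOnd]
        exact fun a ha h => hc (h ▸ ha)
      · rw [if_neg hs]; exact inv.owners_nodup s
    · intro x
      rw [hsizeg, hhmg]
      by_cases hx : x = c
      · rw [if_pos hx, if_pos hx]
        have hsz : size.getD c 0 = (S.length : Int) := by rw [hS]; exact inv.size_eq c
        rw [hsz]
        simp [List.length_append]
      · rw [if_neg hx, if_neg hx]; exact inv.size_eq x
    · intro s x
      have hO' : ∀ y, y ∈ O ↔ suf ∈ hm.getD y PySem.Set.empty := fun y => by
        rw [hO]; exact inv.mem_iff suf y
      have hC' : ∀ t, c ∈ idx.getD t PySem.Set.empty ↔ t ∈ S := fun t => by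
        rw [hS]; exact inv.mem_iff t c
      rw [hidxg, hhmg]
      by_cases hs : s = suf <;> by_cases hx : x = c
      · rw [hs, hx, if_pos rfl, if_pos rfl]; simp
      · rw [hs, if_pos rfl, if_neg hx]
        simp only [List.mem_append, List.mem_singleton]
        constructor
        · rintro (h | rfl)
          · exact (hO' x).mp h
          · exact absurd rfl hx
        · intro h
          exact Or.inl ((hO' x).mpr h)
      · rw [hx, if_neg hs, if_pos rfl]
        simp only [List.mem_append, List.mem_singleton]
        constructor
        · intro h
          exact Or.inl ((hC' s).mp h)
        · rintro (h | h)
          · exact (hC' s).mpr h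
          · exact absurd h hs
      · rw [if_neg hs, if_neg hx]; exact inv.mem_iff s x

lemma pvFold_inv (ideas : List String) (hm : PySem.Dict Char (PySem.Set String))
    (idx : PySem.Dict String (PySem.Set Char)) (size : PySem.Dict Char Int)
    (h : ∀ w ∈ ideas, w ≠ "") (inv : PvInv hm idx size) :
    PvInv (ideas.foldl pvStepA hm) (ideas.foldl pvStepB (idx, size)).1
      (ideas.foldl pvStepB (idx, size)).2 := by
  induction ideas generalizing hm idx size with
  | nil => exact inv
  | cons w t ih =>
    simp only [List.foldl_cons]
    have hstep := pvStep_inv hm idx size inv w (h w (by simp))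
    have := ih (pvStepA hm w) (pvStepB (idx, size) w).1 (pvStepB (idx, size) w).2
      (fun x hx => h x (by simp [hx])) hstep
    simpa using this

-- the inner fold of pvInterStep, one fixed outer letter a'
lemma pvInner_getD (a' a b : Char) (hab : a ≠ b) (m : List Char) :
    ∀ d : PySem.Dict (Char × Char) Int,
      (m.foldl (fun d b' => if a' ≠ b' then d.modify (a', b') 0 (· + 1) else d) d).getD (a, b) 0
        = d.getD (a, b) 0 + (if a' = a then (m.count b : Int) else 0) := by
  induction m with
  | nil => simp
  | cons x t ih =>
    intro d
    simp only [List.foldl_cons]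
    rw [ih]
    by_cases h1 : a' ≠ x
    · rw [if_pos h1, PySem.Dict.getD_modify]
      by_cases h2 : (a, b) = (a', x)
      · rw [Prod.mk.injEq] at h2
        obtain ⟨rfl, rfl⟩ := h2
        simp only [if_pos rfl, List.count_cons_self]
        push_cast
        omega
      · rw [if_neg h2]
        by_cases h3 : a' = a
        · subst h3
          have hx : b ≠ x := fun h => h2 (by rw [h])
          simp only [if_pos rfl]
          rw [List.count_cons_of_ne (Ne.symm hx)]
        · simp [h3]
    · rw [if_neg h1]
      have h1' : a' = x := not_not.mp (fun h => h1 h)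
      by_cases h3 : a' = a
      · subst h3
        have hx : b ≠ x := fun h => hab (by rw [h1', ← h])
        simp only [if_pos rfl]
        rw [List.count_cons_of_ne (Ne.symm hx)]
      · simp [h3]

-- the double fold of pvInterStep over one owners set
lemma pvDouble_getD (a b : Char) (hab : a ≠ b) (m : List Char) :
    ∀ (l : List Char) (d : PySem.Dict (Char × Char) Int),
      (l.foldl (fun d a' =>
          m.foldl (fun d b' => if a' ≠ b' then d.modify (a', b') 0 (· + 1) else d) d) d).getD (a, b) 0
        = d.getD (a, b) 0 + (l.count a : Int) * (m.count b : Int) := by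
  intro l
  induction l with
  | nil => simp
  | cons a' t ih =>
    intro d
    simp only [List.foldl_cons]
    rw [ih, pvInner_getD a' a b hab]
    by_cases h : a' = a
    · subst h
      simp [List.count_cons]
      ring
    · simp [h]

lemma pvLen_two_of_two_mem {o : List Char} (hnd : o.Nodup) {a b : Char}
    (ha : a ∈ o) (hb : b ∈ o) (hab : a ≠ b) : 2 ≤ PySem.Set.len o := by
  have h1 : ({a, b} : Finset Char) ⊆ o.toFinset := by
    intro x hx
    simp only [Finset.mem_insert, Finset.mem_singleton] at hx
    rcases hx with rfl | rfl <;> simp [ha, hb]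
  have h2 : ({a, b} : Finset Char).card = 2 := by
    exact Finset.card_pair hab
  have h3 := Finset.card_le_card h1
  rw [h2, List.toFinset_card_of_nodup hnd] at h3
  simp only [PySem.Set.len]
  omega

-- the whole inter-building fold, characterised per key
lemma pvInterFold_getD (a b : Char) (hab : a ≠ b) :
    ∀ (L : List (PySem.Set Char)) (hL : ∀ o ∈ L, o.Nodup) (d : PySem.Dict (Char × Char) Int),
      (L.foldl pvInterStep d).getD (a, b) 0
        = d.getD (a, b) 0 + ((L.countP (fun o => decide (a ∈ o ∧ b ∈ o))) : Int) := by
  intro L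
  induction L with
  | nil => simp
  | cons o t ih =>
    intro hL d
    simp only [List.foldl_cons]
    rw [ih (fun x hx => hL x (by simp [hx]))]
    have hnd : o.Nodup := hL o (by simp)
    have hstep : (pvInterStep d o).getD (a, b) 0
        = d.getD (a, b) 0 + (if a ∈ o ∧ b ∈ o then 1 else 0) := by
      unfold pvInterStep
      by_cases hlen : 2 ≤ PySem.Set.len o
      · rw [if_pos hlen, pvDouble_getD a b hab]
        by_cases hmem : a ∈ o ∧ b ∈ o
        · rw [List.count_eq_one_of_mem hnd hmem.1, List.count_eq_one_of_mem hnd hmem.2]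
          simp [hmem]
        · rw [if_neg hmem]
          rcases not_and_or.mp hmem with h | h
          · rw [List.count_eq_zero_of_not_mem h]; ring
          · rw [List.count_eq_zero_of_not_mem h]; ring
      · rw [if_neg hlen]
        have : ¬(a ∈ o ∧ b ∈ o) := fun ⟨ha, hb⟩ => hlen (pvLen_two_of_two_mem hnd ha hb hab)
        simp [this]
    rw [hstep]
    rw [List.countP_cons]
    by_cases hmem : a ∈ o ∧ b ∈ o <;> simp [hmem] <;> ring

-- two nodup lists with pointwise-equivalent membership∧predicate have equal countP
lemma pvCountP_eq_of_nodup {α : Type} [DecidableEq α] (l1 l2 : List α) (p q : α → Bool)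
    (h1 : l1.Nodup) (h2 : l2.Nodup)
    (h : ∀ x, (x ∈ l1 ∧ p x = true) ↔ (x ∈ l2 ∧ q x = true)) : l1.countP p = l2.countP q := by
  have hperm : (l1.filter p).Perm (l2.filter q) := by
    rw [List.perm_ext_iff_of_nodup (h1.filter p) (h2.filter q)]
    intro x
    simp only [List.mem_filter]
    exact h x
  rw [List.countP_eq_length_filter, List.countP_eq_length_filter, hperm.length_eq]

-- pointwise-equal bodies give equal double folds
lemma pvFoldl2_congr (l : List Char) (f g : Int → Char → Char → Int)
    (h : ∀ ans c1 c2, f ans c1 c2 = g ans c1 c2) :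
    l.foldl (fun ans c1 => l.foldl (fun ans c2 => f ans c1 c2) ans) 0
      = l.foldl (fun ans c1 => l.foldl (fun ans c2 => g ans c1 c2) ans) 0 := by
  have hfg : f = g := by funext a b c; exact h a b c
  rw [hfg]

-- ===== VERDICT (by name: the statement is the Claim_ definition above) =====
theorem distinctNmaes_spec : Claim_equal_distinctNmaes := by
  intro ideas _hdom hpre
  unfold Spec_distinctNmaes
  have inv0 : PvInv PySem.Dict.empty PySem.Dict.empty PySem.Dict.empty := by
    refine ⟨?_, ?_, ?_, ?_, ?_, ?_⟩ <;>
      simp [PySem.Dict.keys_empty, PySem.Dict.getD_empty, PySem.Set.empty]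
  have inv := pvFold_inv ideas PySem.Dict.empty PySem.Dict.empty PySem.Dict.empty hpre inv0
  simp only [distinctNmaes, distinctNmaes_alt]
  set hm := ideas.foldl pvStepA PySem.Dict.empty with hhm
  set st := ideas.foldl pvStepB (PySem.Dict.empty, PySem.Dict.empty) with hst
  -- the accumulated intersection table holds exactly A's rescan counts
  have hinter : ∀ c1 c2 : Char, c1 ≠ c2 →
      (st.1.values.foldl pvInterStep PySem.Dict.empty).getD (c1, c2) 0
        = (((hm.getD c1 PySem.Set.empty).countP
            (fun w => PySem.Set.contains (hm.getD c2 PySem.Set.empty) w) : Nat) : Int) := by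
    intro c1 c2 hne
    have hpred : ∀ s : String,
        (s ∈ st.1.keys ∧
            ((fun o => decide (c1 ∈ o ∧ c2 ∈ o)) ∘ fun k => st.1.getD k PySem.Set.empty) s = true)
          ↔ (s ∈ hm.getD c1 PySem.Set.empty ∧
            (fun w => PySem.Set.contains (hm.getD c2 PySem.Set.empty) w) s = true) := by
      intro s
      simp only [Function.comp, decide_eq_true_eq]
      constructor
      · rintro ⟨-, h1, h2⟩
        exact ⟨(inv.mem_iff s c1).mp h1,
          (PySem.Set.contains_iff _ _).mpr ((inv.mem_iff s c2).mp h2)⟩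
      · rintro ⟨h1, h2⟩
        exact ⟨pvInv_mem_idx_keys inv h1, (inv.mem_iff s c1).mpr h1,
          (inv.mem_iff s c2).mpr ((PySem.Set.contains_iff _ _).mp h2)⟩
    rw [PySem.Dict.values_eq_map_keys st.1 inv.idx_nodup PySem.Set.empty]
    rw [pvInterFold_getD c1 c2 hne _
      (by intro o ho
          obtain ⟨s, _, rfl⟩ := List.mem_map.mp ho
          exact inv.owners_nodup s) PySem.Dict.empty]
    rw [PySem.Dict.getD_empty, List.countP_map]
    rw [pvCountP_eq_of_nodup st.1.keys (hm.getD c1 PySem.Set.empty) _ _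
      inv.idx_nodup (inv.sets_nodup c1) hpred]
    simp
  rw [inv.keys_eq]
  exact (pvFoldl2_congr hm.keys
    (fun ans c1 c2 =>
      if c1 == c2 then ans
      else
        ans + (PySem.Set.len (hm.getD c1 PySem.Set.empty) -
            (hm.getD c1 PySem.Set.empty).foldl
              (fun i w => if PySem.Set.contains (hm.getD c2 PySem.Set.empty) w then i + 1 else i) 0) *
          (PySem.Set.len (hm.getD c2 PySem.Set.empty) -
            (hm.getD c1 PySem.Set.empty).foldl
              (fun i w => if PySem.Set.contains (hm.getD c2 PySem.Set.empty) w then i + 1 else i) 0))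
    (fun ans c1 c2 =>
      if c1 ≠ c2 then
        ans + (st.2.getD c1 0 - (st.1.values.foldl pvInterStep PySem.Dict.empty).getD (c1, c2) 0) *
          (st.2.getD c2 0 - (st.1.values.foldl pvInterStep PySem.Dict.empty).getD (c1, c2) 0)
      else ans)
    (by
      intro ans c1 c2
      dsimp only
      by_cases h : c1 = c2
      · simp [h]
      · rw [if_neg (by simpa using h), if_pos h]
        rw [PySem.List.foldl_count_if
          (fun w => PySem.Set.contains (hm.getD c2 PySem.Set.empty) w)]
        rw [hinter c1 c2 h, inv.size_eq c1, inv.size_eq c2]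
        simp [PySem.Set.len]))
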